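/- GENERATED by tools/from_farm_form.py from prooffarm-gif/accepted/DGifDecompressLine.12/Lemmas.lean (a worked proof of the farm's unit `DGifDecompressLine.12`,
   accepted by the verdict) — do not edit. -/
import Gif.Spec.Units.DGifDecompressLine_12
import Gif.Spec.AllSegs

/-!
  Lemmas for the unit `DGifDecompressLine.12` (segment 12 of the LZW decoder: THE SECOND POP LOOP, dgif_lib.c:970-972,
  `while (StackPtr != 0 && i < LineLen) Line[i++] = Stack[--StackPtr];`, 106EDEH … 106F43H).

  The assertion `Pop` at the head 106F12H is itself the loop invariant, so the loop is proved as ONE ROUND (`dl12_round`: from `Pop`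
  at the head either to the exit `Upd` at 106FEAH, or to `Pop` at the head again with a smaller StackPtr); Proof.lean chains the
  rounds by a strong induction on StackPtr (`ReachVia.trans`). Everything general is in the tree (Gif/Spec/Words.lean §5c,
  Gif/Spec/LzwCarry.lean: `Body.carry`, `Body.moved`, `Locals.moved`, `Body.line`, `dl_scratch`). What is left here:

      dl12_setcc_zero         the byte of ONE `setcc` is 0 exactly when its condition fails
      dl12_sp_zero / _pos     the test `StackPtr != 0` (`test ebx, ebx ; setne al ; test al, al ; je`), both arms
      dl12_i_lt / _ge         the test `i < LineLen` (`cmp ebp, r14d ; setl dl ; test dl, dl ; jne`), both arms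
      dl12_dec                `sub ebx, 1 ; movsxd r12, ebx` of a StackPtr in [1, 4095]: the number StackPtr − 1
      dl12_round              ONE ROUND of the loop
-/

open X86 X86.User Asan ProgX.Base ProgX.Base.Spec Gif.Spec

namespace Gif.Spec.DGifDecompressLine_12

/-- **The byte that ONE `setcc` leaves** is 0 exactly when its condition fails (the walker's branch fact of `setcc r8 ; test r8, r8 ; je`). -/
theorem dl12_setcc_zero (p : Prop) [Decidable p] : (if p then (1 : BitVec 8) else 0).toNat = 0 ↔ ¬ p := by
  by_cases hp : p
  · simp only [hp, if_true, not_true, iff_false]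
    decide
  · simp only [hp, if_false, not_false_eq_true, iff_true]
    decide

/-- **`StackPtr != 0` was false** (106F12H `test ebx, ebx ; setne al ; test al, al ; je` TAKEN; `h` is the walker's `hbr_106f1f` as it
stands): the whole register `rbx` (a fill level `≤ 4095`) is 0. -/
theorem dl12_sp_zero (x : Word) (hx : x.toNat ≤ 4095)
    (h : (if ¬ (Word.part .w32 x).toNat = 0 then (1 : BitVec 8) else 0).toNat = 0) : x.toNat = 0 := by
  have h0 := (dl12_setcc_zero _).mp h
  rw [ProgX.toNat_part32] at h0
  omega

/-- **`StackPtr != 0` was true** (the `je` at 106F1FH not taken; `h` is `hbr_106f1f` as it stands): `1 ≤ StackPtr`. -/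
theorem dl12_sp_pos (x : Word) (hx : x.toNat ≤ 4095)
    (h : ¬ (if ¬ (Word.part .w32 x).toNat = 0 then (1 : BitVec 8) else 0).toNat = 0) : 1 ≤ x.toNat := by
  rw [dl12_setcc_zero] at h
  rw [ProgX.toNat_part32] at h
  omega

/-- **`i < LineLen` was true** (106F17H `cmp ebp, r14d ; setl dl ; test dl, dl ; jne` TAKEN; `h` is `hbr_106f23` as it stands), for two
registers that hold non-negative `int`s: the signed compare is the compare of the numbers. -/
theorem dl12_i_lt (x y : Word) (hx : x.toNat < 2 ^ 31) (hy : y.toNat < 2 ^ 31)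
    (h : ¬ (if (Word.part .w32 x).toInt < (Word.part .w32 y).toInt then (1 : BitVec 8) else 0).toNat = 0) :
    x.toNat < y.toNat := by
  rw [dl12_setcc_zero] at h
  rw [part32_toInt_small x hx, part32_toInt_small y hy] at h
  omega

/-- **`i < LineLen` was false** (the `jne` at 106F23H not taken; `h` is `hbr_106f23` as it stands): `LineLen ≤ i`. -/
theorem dl12_i_ge (x y : Word) (hx : x.toNat < 2 ^ 31) (hy : y.toNat < 2 ^ 31)
    (h : (if (Word.part .w32 x).toInt < (Word.part .w32 y).toInt then (1 : BitVec 8) else 0).toNat = 0) :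
    y.toNat ≤ x.toNat := by
  have h0 := (dl12_setcc_zero _).mp h
  rw [part32_toInt_small x hx, part32_toInt_small y hy] at h0
  omega

/-- **`--StackPtr`** (106EDEH `sub ebx, 1`, 106EE1H `movsxd r12, ebx`) of a StackPtr in `[1, 4095]`: the new `rbx` and its sign
extension are both the number `StackPtr − 1` (`Word` equations: they rewrite the walker's `w_rbx`, `w_r12`, `w_rdi`). -/
theorem dl12_dec (x : Word) (h1 : 1 ≤ x.toNat) (h2 : x.toNat ≤ 4095) :
    Word.ofBV (Word.part .w32 x - 1#32) = UInt64.ofNat (x.toNat - 1) ∧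
    Word.ofBV (BitVec.signExtend 64 (Word.part .w32 x - 1#32)) = UInt64.ofNat (x.toNat - 1) := by
  have ex : x = UInt64.ofNat x.toNat := (UInt64.ofNat_toNat).symm
  have ep : Word.part .w32 x = BitVec.ofNat 32 x.toNat := by
    rw [ex, cnt32_part, ← ex]
  have e1 : (1#32) = BitVec.ofNat 32 1 := rfl
  have et : (Word.part .w32 x - 1#32).toNat = x.toNat - 1 := by
    rw [ep, e1]
    exact toNat_sub32 _ _ h1 (by omega)
  constructor
  · apply UInt64.toNat_inj.mp
    rw [ProgX.toNat_ofBV32, et, UInt64.toNat_ofNat']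
    omega
  · rw [sext32_bv _ (by omega), et]



set_option maxRecDepth 4000 in
set_option maxHeartbeats 4000000 in
/-- **ONE ROUND OF THE SECOND POP LOOP** (l.970-972; head 106F12H). From `Pop` at the head:
  * `StackPtr = 0` (the `je` at 106F1FH) or `i ≥ LineLen` (the `jne` at 106F23H not taken): nothing is stored, `r14 = Private` and
    `r13 = Prefix` come back from their spill slots: `Upd` at 106FEAH (W1: `StackPtr = 0`, resp. vacuous);
  * otherwise the body 106EDEH … 106F0FH: the checked load `Stack[--StackPtr]` (index in `[0, 4094]`: inside `Stack[4095]`), the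
    checked store `Line[i++] =` (`i < LineLen`: inside the buffer): `Pop` at the head again, StackPtr SMALLER (the loop's measure). -/
theorem dl12_round (Lay : Layout) (hLay : Lay.hi = 0x1000000) (μ : Microarch) (hμ : UserX.MicroOK μ) (u₀ : State)
    (hcode : HasCodeNat Lay u₀ Gif.L.DGifDecompressLine.entry Gif.Code.code_DGifDecompressLine.nat Gif.L.DGifDecompressLine.size)
    (h_load1 : Asan.SmallCheck Lay μ ProgX.Base.WayInv (ProgX.Base.CodeOK u₀) [.rax, .rdx] 1 ProgX.Base.L.__asan_load1_noabort.entry)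
    (h_store1 : Asan.SmallCheck Lay μ ProgX.Base.WayInv (ProgX.Base.CodeOK u₀) [.rax, .rdx] 1 ProgX.Base.L.__asan_store1_noabort.entry)
    (H : Heap) (rest : List Obj) (frames : List (Nat × FrameLayout)) (F : Forest) (R : Rd) (n m : Nat) (e : State) (ret : Word)
    (v : State)
    (hat : DGifDecompressLine.Pop Gif.L.DGifDecompressLine.at_106f12 m H rest frames F R n u₀ e ret v) :
    ReachVia Lay μ WayInv v (fun w =>
      DGifDecompressLine.Upd Gif.L.DGifDecompressLine.at_106fea m H rest frames F R n u₀ e ret w ∨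
      (DGifDecompressLine.Pop Gif.L.DGifDecompressLine.at_106f12 m H rest frames F R n u₀ e ret w ∧
        (w.reg .rbx).toNat < (v.reg .rbx).toNat)) := by
  obtain ⟨hbody, hloc, h_rbx, h_rbp, h_r14, h_r15, h_spv, h_sprefix, h_mu⟩ := hat
  -- 1. THE PRELUDE (the same in every segment of this function; Gif/Spec/LzwCarry.lean §2)
  -- the entry state's facts: `he_room`, `he_top`, …
  have he := hbody.entry
  v_entry he
  -- where gif and pv are, and that LineLen is an `int`
  have hgin := hbody.gif_inside
  have hpin := hbody.pv_inside
  have hn31 : n < 2 ^ 31 := hbody.len_lt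
  -- the present state, in the walker's names
  have w_rip := hbody.rip
  have c_rsp : v.reg .rsp = e.reg .rsp - 200 := hbody.rsp
  have c_r15 : v.reg .r15 = e.reg .rsi := h_r15
  have w_eq : Mem.EqOn ProgX.Base.L.textLo ProgX.Base.L.textHi u₀.mem v.mem := ProgX.Base.conv_code_eqOn hbody.code
  have hdf : v.flags .df = false := (show abiInv _ from hbody.abi).1
  have hmx : v.mxcsr &&& 0x1F80 = 0x1F80 := (show abiInv _ from hbody.abi).2
  have hsse := ProgX.Base.sseOK_of_abiInv hbody.abi
  have w_kept : RegsKept [.rsp] v v := RegsKept.refl _ _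
  -- 2. THE REGISTERS AND SLOTS THE SEGMENT READS
  -- `[rsp+38H]` = Private, `[rsp+40H]` = Prefix (the two exits reload them), `[rsp+08H]` = Stack (the body)
  have k_pv : v.mem.readLE (e.reg .rsp - 144) 8 = F.pv := h_spv
  have k_prefix : v.mem.readLE (e.reg .rsp - 136) 8 = F.pv + 8536 := h_sprefix
  have k_stack : v.mem.readLE (e.reg .rsp - 192) 8 = F.pv + 344 := hloc.s_stack
  -- `ebp = i ≤ LineLen`, `r14d = LineLen`: non-negative `int`s (`movsxd rbp, ebp` is the register itself: a fact for the walker)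
  have hbp31 : (v.reg .rbp).toNat < 2 ^ 31 := by omega
  have h14_31 : (v.reg .r14).toNat < 2 ^ 31 := by omega
  -- 3. THE WALK, FIRST PART (106F12H, l.970): the loop test, to the two exits or to the first check of the body (106EF9H)
  u_walk hcode [hμ.vendor, Gif.Spec.sext32_small (v.reg .rbp) hbp31]
    until [Gif.L.DGifDecompressLine.at_106f12, Gif.L.DGifDecompressLine.at_106fea, Gif.L.DGifDecompressLine.chk27]
    span [ProgX.Base.L.textLo, ProgX.Base.L.textHi] side (v_side)
  · -- EXIT 0x106fea from the `je` of l.970 (`StackPtr = 0`): nothing was stored; `r14`, `r13` restored; W1 by `StackPtr = 0`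
    have hsp0 : (v.reg .rbx).toNat = 0 := dl12_sp_zero _ h_rbx hbr_106f1f
    have habi : (conv u₀).inv s_106f3e := by v_inv
    refine ReachVia.done (Or.inl ⟨⟨hbody.moved w_rip w_rsp w_mem habi, hloc.moved w_mem, ?_, ?_, ?_, ?_, ?_⟩, ?_⟩)
    · rw [w_r14, toNat_ofNat_addr _ (by omega)]
    · rw [w_r13, toNat_ofNat_addr _ (by omega)]
    · rw [w_kept .rbx rfl]
      exact h_rbx
    · rw [w_kept .rbp rfl]
      exact h_rbp
    · intro _
      rw [w_kept .rbx rfl]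
      exact hsp0
    · rw [w_mem]
      exact h_mu
  · -- 0x106ef9 (l.971): the loop test was true: `1 ≤ StackPtr`, `i < LineLen`
    have hsp1 : 1 ≤ (v.reg .rbx).toNat := dl12_sp_pos _ h_rbx hbr_106f1f
    have hi_lt : (v.reg .rbp).toNat < n := by
      have h := dl12_i_lt _ _ hbp31 h14_31 hbr_106f23
      omega
    obtain ⟨e_dec, e_decx⟩ := dl12_dec (v.reg .rbx) hsp1 h_rbx
    rw [e_decx] at w_rdi w_r12
    rw [e_dec] at w_rbx
    clear hbr_106f1f hbr_106f23 e_dec e_decx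
    -- `Line[0 … n)`, `1 ≤ n`: a live buffer above the return address, below C00000H, off the private object
    obtain ⟨hbuf, habove, hbelow, hapart⟩ := hbody.line (by omega)
    -- 4. THE WALK, SECOND PART: the body of the loop, back to the head
    u_walk hcode [hμ.vendor]
      until [Gif.L.DGifDecompressLine.at_106f12]
      span [ProgX.Base.L.textLo, ProgX.Base.L.textHi] side (v_side)
    case check_106ef9 =>
      -- l.971 `Stack[--StackPtr]`: inside `Stack[4095]` (`1 ≤ StackPtr ≤ 4095`)
      have hun : ShadowUntouched v.mem s_106ef9.mem := by v_untouched
      have hl := stackLive hbody.ok.pv_live rest (DGifDecompressLine.framesIn frames e) ((v.reg .rbx).toNat - 1) (by omega)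
      simp only [gfield] at hl
      exact hl.accSmall hbody.inv.shadow hun _ 1 (by decide) (by u_omega) (by u_omega)
    case check_106f06 =>
      -- l.971 `Line[i++] =`: inside `Line[0 … n)` (`i < LineLen`)
      have hun : ShadowUntouched v.mem s_106f06.mem := by v_untouched
      exact hbuf.live.accSmall hbody.inv.shadow hun _ 1 (by decide) (by u_omega) (by u_omega)
    -- EXIT 0x106f12 (l.970): the head again, `StackPtr − 1`, `i + 1`: `Body` through the round's stores by `Body.carry`
    -- what was stored: the return addresses of the two checks, `Line[i]`
    have hun : ShadowUntouched v.mem s_106f0f.mem := by v_untouched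
    have hsame : Mem.SameExcept [⟨(e.reg .rsp).toNat - 208, (e.reg .rsp).toNat - 200⟩,
        ⟨(e.reg .rsi).toNat + (v.reg .rbp).toNat, (e.reg .rsi).toNat + (v.reg .rbp).toNat + 1⟩] v.mem s_106f0f.mem := by
      rw [w_mem]
      u_same
    have habi : (conv u₀).inv s_106f0f := by v_inv
    obtain ⟨k_body, k_loc, k_mu, k_clear, k_eof⟩ :=
      hbody.carry (cut' := Gif.L.DGifDecompressLine.at_106f12) w_rip w_rsp w_eq habi hun hsame (by dl_scratch)
    -- `Pop` again: `Body`, `Locals`, then `rbx`, `rbp`, `r14`, `r15`, the two spill slots, the measure of the main loop; then the loop's own measure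
    refine ReachVia.done (Or.inr ⟨⟨k_body, k_loc hloc, ?_, ?_, ?_, ?_, ?_, ?_, ?_⟩, ?_⟩)
    · -- StackPtr − 1 ≤ 4095
      rw [w_rbx, toNat_ofNat_addr _ (by omega)]
      omega
    · -- i + 1 ≤ LineLen
      rw [w_rbp, Gif.Spec.lea32_succ _ (by omega)]
      omega
    · -- r14d = LineLen: not written
      rw [w_kept .r14 rfl]
      exact h_r14
    · -- r15 = Line: not written
      rw [w_kept .r15 rfl]
      exact h_r15
    · -- `Private` in [rsp+38H]: not stored to
      u_frame h_spv
    · -- `Prefix` in [rsp+40H]: not stored to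
      u_frame h_sprefix
    · -- the measure of the main loop: no store of the round touched it
      rw [k_mu]
      exact h_mu
    · -- THE LOOP'S MEASURE: StackPtr − 1 < StackPtr
      rw [w_rbx, toNat_ofNat_addr _ (by omega)]
      omega
  · -- EXIT 0x106fea from the `jne` of l.970 not taken (`i ≥ LineLen`): nothing was stored; `r14`, `r13` restored; W1 is vacuous
    have hi_ge : n ≤ (v.reg .rbp).toNat := by
      have h := dl12_i_ge _ _ hbp31 h14_31 hbr_106f23
      omega
    have habi : (conv u₀).inv s_106f2f := by v_inv
    refine ReachVia.done (Or.inl ⟨⟨hbody.moved w_rip w_rsp w_mem habi, hloc.moved w_mem, ?_, ?_, ?_, ?_, ?_⟩, ?_⟩)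
    · rw [w_r14, toNat_ofNat_addr _ (by omega)]
    · rw [w_r13, toNat_ofNat_addr _ (by omega)]
    · rw [w_kept .rbx rfl]
      exact h_rbx
    · rw [w_kept .rbp rfl]
      exact h_rbp
    · intro hlt
      rw [w_kept .rbp rfl] at hlt
      omega
    · rw [w_mem]
      exact h_mu

end Gif.Spec.DGifDecompressLine_12
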